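-- pv_equiv track=rewrite | github.com/Scilab-RL/Scilab-RL | util/util.py | get_subdir_by_params
-- ===== SOURCE A (Python) =====
-- def get_subdir_by_params(path_params, ctr=0):
--     param_strs = []
--
--     def shorten_split_elem(elem_str, chars_to_split):
--         split_elems = elem_str.split(chars_to_split[0])
--         short_split_elem_strs = []
--         for split_elem in split_elems:
--             if len(chars_to_split) == 1:
--                 if split_elem.find("_") == -1:
--                     short_split_elem = str(split_elem)
--                 else:
--                     short_split_elem = "_".join([us_elem[:2] for us_elem in split_elem.split("_")])
--             else:
--                 short_split_elem = shorten_split_elem(split_elem, chars_to_split[1:])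
--             short_split_elem_strs.append(short_split_elem)
--         short_ret_str = chars_to_split[0].join(short_split_elem_strs)
--         return short_ret_str
--
--     for p,v in sorted(path_params.items()):
--         if str(v) == '':
--             continue
--         this_key_str = "".join([s[:3] for s in p.split("_")])
--         chars_to_split = [",", ":", "[", "]"]
--         this_v_str = shorten_split_elem(str(v), chars_to_split)
--         this_param_str = '{}={}'.format(this_key_str, this_v_str)
--         param_strs.append(this_param_str)
--
--     subdir_str = "&".join(param_strs)
--     subdir_str += "&" + str(ctr)
--
--     # param_subdir = "_".join(
--     #     ['{}:{}'.format("".join([s[:2] for s in p.split("_")]), str(v).split(":")[-1]) for p, v in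
--     #      sorted(path_params.items()) if str(v) != '']) + "_" + str(ctr)
--     return subdir_str
-- ===== SOURCE B (Python) =====
-- def get_subdir_by_params(path_params, ctr=0):
--     seps = (',', ':', '[', ']')
--
--     def shorten(piece):
--         if '_' in piece:
--             return '_'.join(e[:2] for e in piece.split('_'))
--         return piece
--
--     def short_val(s):
--         # one linear scan over the value string instead of nested recursive splits
--         out = []
--         token = []
--         for ch in s:
--             if ch in seps:
--                 out.append(shorten(''.join(token)))
--                 out.append(ch)
--                 token = []
--             else:
--                 token.append(ch)
--         out.append(shorten(''.join(token)))
--         return ''.join(out)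
--
--     parts = ['{}={}'.format(''.join(s[:3] for s in p.split('_')), short_val(str(v)))
--              for p, v in sorted(path_params.items()) if str(v) != '']
--     return '&'.join(parts) + '&' + str(ctr)
-- ===== Notes on version B (the rewrite author's own statement) =====
-- stated objective: alternative
-- what changed: The four-level recursive split/re-join of each value over the separator list is replaced by a single left-to-right scan that tokenizes the value on all four separators at once and shortens each token as it is emitted; the outer loop becomes a filter/map comprehension.
import Mathlib
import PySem

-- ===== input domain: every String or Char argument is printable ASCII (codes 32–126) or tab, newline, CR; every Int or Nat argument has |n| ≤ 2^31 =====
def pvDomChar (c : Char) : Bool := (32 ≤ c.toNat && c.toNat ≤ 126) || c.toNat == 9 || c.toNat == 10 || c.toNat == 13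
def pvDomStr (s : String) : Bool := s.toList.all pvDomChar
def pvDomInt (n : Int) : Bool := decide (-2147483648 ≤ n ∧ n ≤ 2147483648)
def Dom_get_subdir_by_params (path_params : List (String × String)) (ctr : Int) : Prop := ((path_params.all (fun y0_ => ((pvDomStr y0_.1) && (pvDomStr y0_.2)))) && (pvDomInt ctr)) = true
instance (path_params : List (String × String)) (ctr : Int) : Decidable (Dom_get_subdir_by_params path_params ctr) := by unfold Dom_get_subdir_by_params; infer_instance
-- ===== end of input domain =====

-- B replaces A's four-level recursive split/re-join of each value by a single left-to-right
-- scan that tokenizes the value on all four separators at once (objective: alternative).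

-- ===== PORT A =====
-- leaf shortening: the len(chars_to_split) == 1 body of A's shorten_split_elem
def pvLeafA (piece : List Char) : List Char :=
  if PySem.Chars.find piece ['_'] == -1 then piece
  else PySem.Chars.join ['_'] ((PySem.Chars.splitOn piece ['_']).map (fun e => e.take 2))

-- A's recursive shorten_split_elem over the separator list
def pvShortenSplitElem : List Char → List Char → List Char
  | _, [] => []  -- never reached: A always calls it with a nonempty separator list
  | elem, [c] => PySem.Chars.join [c] ((PySem.Chars.splitOn elem [c]).map pvLeafA)
  | elem, c :: c' :: rest =>
      PySem.Chars.join [c] ((PySem.Chars.splitOn elem [c]).map (fun e => pvShortenSplitElem e (c' :: rest)))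

def get_subdir_by_params (path_params : List (String × String)) (ctr : Int) : String :=
  let items := (PySem.Dict.ofList path_params).items
  let sortedItems := PySem.List.sorted2 items (fun pv => pv.1) (fun pv => pv.2)
  let param_strs : List (List Char) := sortedItems.foldl (fun acc pv =>
    if pv.2 == "" then acc
    else acc ++ [PySem.Chars.join [] ((PySem.Chars.splitOn pv.1.toList ['_']).map (fun sp => sp.take 3))
      ++ ['='] ++ pvShortenSplitElem pv.2.toList [',', ':', '[', ']']]) []
  String.mk (PySem.Chars.join ['&'] param_strs ++ ['&'] ++ PySem.Int.toChars ctr)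

-- ===== PORT B =====
def pvIsSepB (c : Char) : Bool := c == ',' || c == ':' || c == '[' || c == ']'

-- B's shorten(piece)
def pvShortenB (piece : List Char) : List Char :=
  if PySem.Chars.isIn ['_'] piece then
    PySem.Chars.join ['_'] ((PySem.Chars.splitOn piece ['_']).map (fun e => e.take 2))
  else piece

-- one step of B's scan: state = (emitted pieces, current token)
def pvStepB (st : List (List Char) × List Char) (ch : Char) : List (List Char) × List Char :=
  if pvIsSepB ch then (st.1 ++ [pvShortenB st.2] ++ [[ch]], []) else (st.1, st.2 ++ [ch])

-- B's short_val: one pass over the value string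
def pvShortValB (s : List Char) : List Char :=
  let st := s.foldl pvStepB ([], [])
  PySem.Chars.join [] (st.1 ++ [pvShortenB st.2])

def get_subdir_by_params_alt (path_params : List (String × String)) (ctr : Int) : String :=
  let items := (PySem.Dict.ofList path_params).items
  let sortedItems := PySem.List.sorted2 items (fun pv => pv.1) (fun pv => pv.2)
  let parts : List (List Char) := (sortedItems.filter (fun pv => !(pv.2 == ""))).map (fun pv =>
    PySem.Chars.join [] ((PySem.Chars.splitOn pv.1.toList ['_']).map (fun sp => sp.take 3))
      ++ ['='] ++ pvShortValB pv.2.toList)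
  String.mk (PySem.Chars.join ['&'] parts ++ ['&'] ++ PySem.Int.toChars ctr)

-- ===== PRECONDITION & SPEC =====
def Spec_get_subdir_by_params (path_params : List (String × String)) (ctr : Int) (out : String) : Prop := out = get_subdir_by_params_alt path_params ctr
instance (path_params : List (String × String)) (ctr : Int) (out : String) : Decidable (Spec_get_subdir_by_params path_params ctr out) := by unfold Spec_get_subdir_by_params; infer_instance

-- ===== CLAIM (what is proved, stated in full; the proofs are below) =====
def Claim_equal_get_subdir_by_params : Prop := ∀ (path_params : List (String × String)) (ctr : Int), Dom_get_subdir_by_params path_params ctr → Spec_get_subdir_by_params path_params ctr (get_subdir_by_params path_params ctr)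

-- ===== LEMMAS AND PROOFS =====

def pvMapHead (f : List Char → List Char) : List (List Char) → List (List Char)
  | [] => []
  | t :: ts => f t :: ts

def pvSplit1 (c : Char) : List Char → List (List Char)
  | [] => [[]]
  | a :: rest => if a == c then [] :: pvSplit1 c rest else pvMapHead (a :: ·) (pvSplit1 c rest)

theorem pvSplit1_ne_nil (c : Char) (s : List Char) : pvSplit1 c s ≠ [] := by
  cases s with
  | nil => simp [pvSplit1]
  | cons a rest =>
    simp only [pvSplit1]
    split
    · simp
    · cases h : pvSplit1 c rest with
      | nil => exact fun hh => (pvSplit1_ne_nil c rest h).elim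
      | cons t ts => simp [pvMapHead]

theorem pvGo_eq (c : Char) : ∀ (fuel : Nat) (l cur : List Char) (acc : List (List Char)),
    l.length < fuel →
    PySem.Chars.splitOn.go [c] fuel l cur acc
      = acc.reverse ++ pvMapHead (cur.reverse ++ ·) (pvSplit1 c l) := by
  intro fuel
  induction fuel with
  | zero => intro l cur acc h; omega
  | succ n ih =>
    intro l cur acc h
    cases l with
    | nil => simp [PySem.Chars.splitOn.go, pvSplit1, pvMapHead]
    | cons a rest =>
      rw [PySem.Chars.splitOn.go]
      by_cases hac : a = c
      · subst hac
        simp only [List.isPrefixOf, BEq.rfl, Bool.and_eq_true]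
        rw [if_pos (by simp)]
        rw [ih _ _ _ (by simpa using Nat.lt_of_succ_lt_succ h)]
        cases hsp : pvSplit1 a rest with
        | nil => exact absurd hsp (pvSplit1_ne_nil a rest)
        | cons t ts => simp [pvSplit1, hsp, pvMapHead]
      · rw [if_neg (by simp [List.isPrefixOf]; exact fun hh => hac hh.symm)]
        rw [ih _ _ _ (by simpa using Nat.lt_of_succ_lt_succ h)]
        have hne := pvSplit1_ne_nil c rest
        cases hsp : pvSplit1 c rest with
        | nil => exact absurd hsp hne
        | cons t ts =>
          simp [pvSplit1, hsp, pvMapHead, hac]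

theorem pvSplitOn_single (s : List Char) (c : Char) :
    PySem.Chars.splitOn s [c] = pvSplit1 c s := by
  rw [PySem.Chars.splitOn, pvGo_eq c (s.length + 1) s [] [] (by omega)]
  cases h : pvSplit1 c s with
  | nil => exact absurd h (pvSplit1_ne_nil c s)
  | cons t ts => simp [pvMapHead]

def pvTok (P : Char → Bool) : List Char → List (List Char)
  | [] => [[]]
  | a :: rest => if P a then [] :: [a] :: pvTok P rest else pvMapHead (a :: ·) (pvTok P rest)

theorem pvTok_ne_nil (P : Char → Bool) (s : List Char) : pvTok P s ≠ [] := by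
  cases s with
  | nil => simp [pvTok]
  | cons a rest =>
    simp only [pvTok]
    split
    · simp
    · cases h : pvTok P rest with
      | nil => exact fun _ => (pvTok_ne_nil P rest h).elim
      | cons t ts => simp [pvMapHead]

def pvGlue (c : Char) : List (List (List Char)) → List (List Char)
  | [] => []
  | [x] => x
  | x :: y :: ys => x ++ [[c]] ++ pvGlue c (y :: ys)

theorem pvGlue_cons_prepend (c : Char) (p q : List (List Char)) (xs : List (List (List Char))) :
    pvGlue c ((p ++ q) :: xs) = p ++ pvGlue c (q :: xs) := by
  cases xs with
  | nil => simp [pvGlue]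
  | cons y ys => simp [pvGlue]

theorem pvMapHead_append (f : List Char → List Char) (x : List (List Char)) (hx : x ≠ [])
    (r : List (List Char)) : pvMapHead f (x ++ r) = pvMapHead f x ++ r := by
  cases x with
  | nil => exact absurd rfl hx
  | cons t ts => simp [pvMapHead]

theorem pvTok_add_sep (P : Char → Bool) (c : Char) (hc : P c = false) (s : List Char) :
    pvTok (fun x => x == c || P x) s = pvGlue c ((pvSplit1 c s).map (pvTok P)) := by
  induction s with
  | nil => simp [pvTok, pvSplit1, pvGlue]
  | cons a rest ih =>
    by_cases hac : (a == c) = true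
    · have ha : a = c := eq_of_beq hac
      subst ha
      have h1 : pvTok (fun x => x == a || P x) (a :: rest)
          = [] :: [a] :: pvTok (fun x => x == a || P x) rest := by simp [pvTok]
      have h2 : pvSplit1 a (a :: rest) = [] :: pvSplit1 a rest := by simp [pvSplit1]
      rw [h1, h2, ih]
      cases hsp : (pvSplit1 a rest).map (pvTok P) with
      | nil => exact absurd (by simpa using hsp) (pvSplit1_ne_nil a rest)
      | cons z zs =>
        simp only [List.map_cons, hsp]
        simp [pvGlue, pvTok]
    · cases hsr : pvSplit1 c rest with
      | nil => exact absurd hsr (pvSplit1_ne_nil c rest)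
      | cons t ts =>
        have h2 : pvSplit1 c (a :: rest) = (a :: t) :: ts := by
          simp [pvSplit1, hac, hsr, pvMapHead]
        by_cases hPa : P a = true
        · have h1 : pvTok (fun x => x == c || P x) (a :: rest)
              = [] :: [a] :: pvTok (fun x => x == c || P x) rest := by
            simp [pvTok, hPa]
          rw [h1, h2, ih, hsr]
          simp only [List.map]
          have h3 : pvTok P (a :: t) = [[], [a]] ++ pvTok P t := by
            simp [pvTok, hPa]
          rw [h3, pvGlue_cons_prepend]
          rfl
        · have hPa' : P a = false := by simpa using hPa
          have h1 : pvTok (fun x => x == c || P x) (a :: rest)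
              = pvMapHead (a :: ·) (pvTok (fun x => x == c || P x) rest) := by
            simp [pvTok, hac, hPa']
          rw [h1, h2, ih, hsr]
          simp only [List.map]
          have h3 : pvTok P (a :: t) = pvMapHead (a :: ·) (pvTok P t) := by
            simp [pvTok, hPa']
          rw [h3]
          cases hmts : (ts.map (pvTok P) : List (List (List Char))) with
          | nil => simp [pvGlue]
          | cons y ys =>
            simp only [pvGlue]
            rw [List.append_assoc, pvMapHead_append _ _ (pvTok_ne_nil P t), ← List.append_assoc]

theorem pvTok_false (s : List Char) : pvTok (fun _ => false) s = [s] := by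
  induction s with
  | nil => rfl
  | cons a rest ih => simp [pvTok, ih, pvMapHead]

theorem pvJoinNil (L : List (List Char)) : PySem.Chars.join [] L = L.flatten := by
  induction L with
  | nil => rfl
  | cons x xs ih =>
    cases xs with
    | nil => simp [PySem.Chars.join, List.intercalate, List.intersperse]
    | cons y ys =>
      simp only [PySem.Chars.join, List.intercalate, List.intersperse] at ih ⊢
      simp_all

theorem pvJoinCons (sep x y : List Char) (zs : List (List Char)) :
    PySem.Chars.join sep (x :: y :: zs) = x ++ sep ++ PySem.Chars.join sep (y :: zs) := by
  simp [PySem.Chars.join, List.intercalate, List.intersperse]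

theorem pvJoinSingle (sep x : List Char) : PySem.Chars.join sep [x] = x := by
  simp [PySem.Chars.join, List.intercalate, List.intersperse]

theorem pvJoin_glue (c : Char) (f : List Char → List Char) (hf : f [c] = [c]) :
    ∀ L : List (List (List Char)),
      PySem.Chars.join [] ((pvGlue c L).map f)
        = PySem.Chars.join [c] (L.map (fun ps => PySem.Chars.join [] (ps.map f))) := by
  intro L
  induction L with
  | nil => rfl
  | cons x xs ih =>
    cases xs with
    | nil => simp [pvGlue]
    | cons y ys =>
      simp only [pvGlue, List.map_append, List.map_cons, List.map_nil]
      rw [pvJoinNil] at ih ⊢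
      simp only [List.flatten_append, List.flatten_cons, List.flatten_nil, List.append_nil, hf]
      rw [ih, List.map_cons, pvJoinCons]
      simp [pvJoinNil]

def pvG (P : Char → Bool) (s : List Char) : List Char :=
  PySem.Chars.join [] ((pvTok P s).map pvLeafA)

theorem pvShortenB_eq_leaf (p : List Char) : pvShortenB p = pvLeafA p := by
  by_cases h : (['_'] : List Char) <:+: p
  · rw [pvShortenB, if_pos ((PySem.Chars.isIn_iff_infix _ _).mpr h), pvLeafA,
      if_neg (by simp only [beq_iff_eq, PySem.Chars.find_eq_neg_one_iff, not_not]; exact h)]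
  · rw [pvShortenB, if_neg (by simp only [PySem.Chars.isIn_iff_infix]; exact h), pvLeafA,
      if_pos (by simp only [beq_iff_eq, PySem.Chars.find_eq_neg_one_iff]; exact h)]

theorem pvShortenB_funext : pvShortenB = pvLeafA := funext pvShortenB_eq_leaf

def pvProc (t0 : List Char) : List (List Char) → List (List Char)
  | [] => []
  | t :: ts => pvShortenB (t0 ++ t) :: ts.map pvShortenB

theorem pvShortenB_sep (ch : Char) (h : pvIsSepB ch = true) : pvShortenB [ch] = [ch] := by
  have : ch = ',' ∨ ch = ':' ∨ ch = '[' ∨ ch = ']' := by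
    have := h; simp [pvIsSepB] at this; tauto
  rcases this with h | h | h | h <;> subst h <;> decide

theorem pvScanB : ∀ (s : List Char) (out : List (List Char)) (t0 : List Char),
    (s.foldl pvStepB (out, t0)).1 ++ [pvShortenB (s.foldl pvStepB (out, t0)).2]
      = out ++ pvProc t0 (pvTok pvIsSepB s) := by
  intro s
  induction s with
  | nil => intro out t0; simp [pvProc, pvTok]
  | cons ch s' ih =>
    intro out t0
    by_cases h : pvIsSepB ch = true
    · rw [show (ch :: s').foldl pvStepB (out, t0)
          = s'.foldl pvStepB (out ++ [pvShortenB t0] ++ [[ch]], []) by simp [pvStepB, h]]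
      rw [ih]
      rw [show pvTok pvIsSepB (ch :: s') = [] :: [ch] :: pvTok pvIsSepB s' by simp [pvTok, h]]
      cases htk : pvTok pvIsSepB s' with
      | nil => exact absurd htk (pvTok_ne_nil _ _)
      | cons t ts => simp [pvProc, pvShortenB_sep ch h]
    · have h' : pvIsSepB ch = false := by simpa using h
      rw [show (ch :: s').foldl pvStepB (out, t0)
          = s'.foldl pvStepB (out, t0 ++ [ch]) by simp [pvStepB, h']]
      rw [ih]
      rw [show pvTok pvIsSepB (ch :: s') = pvMapHead (ch :: ·) (pvTok pvIsSepB s') by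
        simp [pvTok, h']]
      cases htk : pvTok pvIsSepB s' with
      | nil => exact absurd htk (pvTok_ne_nil _ _)
      | cons t ts => simp [pvProc, pvMapHead]

theorem pvShortValB_eq_g (s : List Char) : pvShortValB s = pvG pvIsSepB s := by
  rw [pvShortValB, pvG]
  have := pvScanB s [] []
  simp only [List.nil_append] at this
  rw [this]
  cases htk : pvTok pvIsSepB s with
  | nil => exact absurd htk (pvTok_ne_nil _ _)
  | cons t ts => simp [pvProc, pvShortenB_funext]

theorem pvG_add_sep (P : Char → Bool) (c : Char) (hc : P c = false)
    (hleaf : pvLeafA [c] = [c]) (s : List Char) :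
    pvG (fun x => x == c || P x) s
      = PySem.Chars.join [c] ((pvSplit1 c s).map (pvG P)) := by
  rw [pvG, pvTok_add_sep P c hc s, pvJoin_glue c pvLeafA hleaf, List.map_map]
  rfl

def pvP4 : Char → Bool := fun x => x == ']'
def pvP3 : Char → Bool := fun x => x == '[' || pvP4 x
def pvP2 : Char → Bool := fun x => x == ':' || pvP3 x
def pvP1 : Char → Bool := fun x => x == ',' || pvP2 x




theorem pvLeaf_sep : pvLeafA [','] = [','] ∧ pvLeafA [':'] = [':']
    ∧ pvLeafA ['['] = ['['] ∧ pvLeafA [']'] = [']'] := by decide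

theorem pvL4 (s : List Char) : pvShortenSplitElem s [']'] = pvG pvP4 s := by
  rw [pvShortenSplitElem, pvSplitOn_single]
  have h4 : pvP4 = fun x => x == ']' || (fun _ => false) x := by
    funext x; simp [pvP4]
  rw [h4, pvG_add_sep (fun _ => false) ']' rfl pvLeaf_sep.2.2.2 s]
  congr 1
  apply List.map_congr_left
  intro t _
  rw [pvG, pvTok_false, List.map_cons, List.map_nil, pvJoinSingle]

theorem pvL3 (s : List Char) : pvShortenSplitElem s ['[', ']'] = pvG pvP3 s := by
  rw [pvShortenSplitElem, pvSplitOn_single,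
    show pvP3 = fun x => x == '[' || pvP4 x from rfl,
    pvG_add_sep pvP4 '[' (by decide) pvLeaf_sep.2.2.1 s]
  congr 1
  apply List.map_congr_left
  intro t _
  exact pvL4 t

theorem pvL2 (s : List Char) : pvShortenSplitElem s [':', '[', ']'] = pvG pvP2 s := by
  rw [pvShortenSplitElem, pvSplitOn_single,
    show pvP2 = fun x => x == ':' || pvP3 x from rfl,
    pvG_add_sep pvP3 ':' (by decide) pvLeaf_sep.2.1 s]
  congr 1
  apply List.map_congr_left
  intro t _
  exact pvL3 t

theorem pvL1 (s : List Char) : pvShortenSplitElem s [',', ':', '[', ']'] = pvG pvP1 s := by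
  rw [pvShortenSplitElem, pvSplitOn_single,
    show pvP1 = fun x => x == ',' || pvP2 x from rfl,
    pvG_add_sep pvP2 ',' (by decide) pvLeaf_sep.1 s]
  congr 1
  apply List.map_congr_left
  intro t _
  exact pvL2 t

theorem pvP1_eq_isSep : pvP1 = pvIsSepB := by
  funext x
  simp only [pvP1, pvP2, pvP3, pvP4, pvIsSepB, Bool.or_assoc]

theorem pvValue_eq (s : List Char) :
    pvShortenSplitElem s [',', ':', '[', ']'] = pvShortValB s := by
  rw [pvL1, pvShortValB_eq_g, pvP1_eq_isSep]

-- ===== VERDICT (by name: the statement is the Claim_ definition above) =====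
theorem get_subdir_by_params_spec : Claim_equal_get_subdir_by_params := by
  intro path_params ctr _
  unfold Spec_get_subdir_by_params get_subdir_by_params get_subdir_by_params_alt
  simp only []
  congr 1
  congr 1
  rw [show (fun (acc : List (List Char)) (pv : String × String) =>
      if pv.2 == "" then acc
      else acc ++ [PySem.Chars.join [] ((PySem.Chars.splitOn pv.1.toList ['_']).map (fun sp => sp.take 3))
        ++ ['='] ++ pvShortenSplitElem pv.2.toList [',', ':', '[', ']']])
    = (fun acc pv =>
      if (!(pv.2 == "")) = true
      then acc ++ [PySem.Chars.join [] ((PySem.Chars.splitOn pv.1.toList ['_']).map (fun sp => sp.take 3))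
        ++ ['='] ++ pvShortenSplitElem pv.2.toList [',', ':', '[', ']']]
      else acc) from by
    funext acc pv
    cases h : pv.2 == "" <;> simp]
  rw [PySem.List.foldl_append_if, List.nil_append]
  congr 1
  congr 1
  apply List.map_congr_left
  intro pv _
  rw [pvValue_eq]
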